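-- pv_equiv track=rewrite | github.com/tinsukE/advent-of-code | 2023/13.py | find_vertical_split
-- ===== SOURCE A (Python) =====
-- def col_diff(terrain, col1, col2):
-- 	diff = 0
-- 	for row in range(len(terrain)):
-- 		if terrain[row][col1] != terrain[row][col2]:
-- 			diff += 1
-- 	return diff
--
-- def find_vertical_split(terrain, diff):
-- 	cols = len(terrain[0])
-- 	for split in range(cols - 1):
-- 		delta_col = min(split + 1, cols - split - 1)
--
-- 		actual_diff = 0
-- 		for j in range(delta_col):
-- 			actual_diff += col_diff(terrain, split - j, split + j + 1)
-- 		if actual_diff == diff: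
-- 			return split
-- 	return -1
-- ===== SOURCE B (Python) =====
-- def find_vertical_split(terrain, diff):
-- 	cols = len(terrain[0])
-- 	if cols < 2:
-- 		return -1
-- 	shift = cols.bit_length() + 1
-- 	mask = (1 << shift) - 1
-- 	# doubled[s] = twice the number of matching mirrored cell pairs around split s,
-- 	# obtained for ALL splits at once from the square of per-character bit-packed
-- 	# column indicators (exact Kronecker-substitution convolution).
-- 	doubled = [0] * (cols - 1)
-- 	for row in terrain:
-- 		prefix = row[:cols]
-- 		for ch in set(prefix):
-- 			n = 0
-- 			for i, c in enumerate(prefix):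
-- 				if c == ch:
-- 					n += 1 << (i * shift)
-- 			sq = n * n
-- 			doubled = [d + ((sq >> ((2 * s + 1) * shift)) & mask) for s, d in enumerate(doubled)]
-- 	rows = len(terrain)
-- 	for s in range(cols - 1):
-- 		if rows * min(s + 1, cols - s - 1) - doubled[s] // 2 == diff:
-- 			return s
-- 	return -1
-- ===== Notes on version B (the rewrite author's own statement) =====
-- stated objective: alternative
-- what changed: B computes the mirrored-match counts for ALL split positions at once by exact Kronecker-substitution convolution: per row and per character it packs a 0/1 column-indicator into one big integer, squares it, and reads the odd coefficients of the square, which are exactly twice the number of matching mirrored cell pairs around each split; a final scan picks the first split whose mismatch total equals diff. A instead rescans mirrored column pairs per split via col_diff. …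
-- outside the precondition, e.g. on find_vertical_split(['abXY', 'abQ'], 2): A returns 0, B returns 0; on find_vertical_split(['aXb', 'aX'], 2): A returns 0, B returns 0
import Mathlib
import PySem

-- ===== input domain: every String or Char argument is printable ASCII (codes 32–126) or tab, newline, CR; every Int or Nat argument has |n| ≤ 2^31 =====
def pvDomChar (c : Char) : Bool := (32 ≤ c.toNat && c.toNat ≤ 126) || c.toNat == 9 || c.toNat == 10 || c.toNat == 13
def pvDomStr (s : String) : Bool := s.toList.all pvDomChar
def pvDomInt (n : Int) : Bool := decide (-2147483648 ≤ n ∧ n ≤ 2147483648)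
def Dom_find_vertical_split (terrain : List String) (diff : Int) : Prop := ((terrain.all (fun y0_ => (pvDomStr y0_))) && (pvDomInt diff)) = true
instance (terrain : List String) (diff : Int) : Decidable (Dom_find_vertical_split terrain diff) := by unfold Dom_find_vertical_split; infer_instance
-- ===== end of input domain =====

-- B replaces A's per-split mirrored-pair rescans by one exact big-integer (Kronecker-substitution)
-- convolution per row and character, reading off the match counts of all splits from the digits of a
-- square; objective: alternative (no speed claim).

-- ===== PORT A =====
def col_diff (terrain : List String) (col1 col2 : Int) : Int :=
  (PySem.List.pyRange 0 (terrain.length : Int) 1).foldl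
    (fun d row =>
      if PySem.Str.pyGet? (PySem.List.pyGetD terrain row "") col1 ≠
         PySem.Str.pyGet? (PySem.List.pyGetD terrain row "") col2 then d + 1 else d) 0

def findLoopA (terrain : List String) (diff cols : Int) : List Int → Int
  | [] => -1
  | split :: rest =>
    let delta_col := min (split + 1) (cols - split - 1)
    let actual_diff := (PySem.List.pyRange 0 delta_col 1).foldl
      (fun acc j => acc + col_diff terrain (split - j) (split + j + 1)) 0
    if actual_diff = diff then split else findLoopA terrain diff cols rest

def find_vertical_split (terrain : List String) (diff : Int) : Int :=
  let cols := PySem.Str.len (PySem.List.pyGetD terrain 0 "")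
  findLoopA terrain diff cols (PySem.List.pyRange 0 (cols - 1) 1)

-- ===== PORT B =====
-- n = sum(1 << (i*shift) for i, c in enumerate(pfx) if c == ch); indices are nonneg (.toNat exact)
def packB (pfx : List Char) (ch : Char) (shift : Nat) : Nat :=
  (PySem.List.enumerate pfx).foldl
    (fun n ic => if ic.2 = ch then n + (1 <<< (ic.1.toNat * shift)) else n) 0

-- doubled = [d + ((sq >> ((2*s+1)*shift)) & mask) for s, d in enumerate(doubled)]; all values nonneg
def addDigits (doubled : List Nat) (sq shift mask : Nat) : List Nat :=
  (PySem.List.enumerate doubled).map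
    (fun sd => sd.2 + ((sq >>> ((2 * sd.1.toNat + 1) * shift)) &&& mask))

-- body of 'for row in terrain': iterate the distinct chars of row[:cols] (sum is order-independent)
def rowStep (shift mask : Nat) (cols : Int) (doubled : List Nat) (row : String) : List Nat :=
  let pfx := PySem.List.slice row.toList none (some cols)
  (PySem.Set.ofList pfx).foldl
    (fun d ch => addDigits d (packB pfx ch shift * packB pfx ch shift) shift mask)
    doubled

-- final 'for s in range(cols-1)'; doubled[s] // 2 is Nat division on a nonneg value (exact)
def findLoopBsplit (rows cols : Int) (doubled : List Nat) (diff : Int) : List Int → Int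
  | [] => -1
  | s :: rest =>
    if rows * min (s + 1) (cols - s - 1) - ((PySem.List.pyGetD doubled s 0 / 2 : Nat) : Int) = diff
    then s else findLoopBsplit rows cols doubled diff rest

def find_vertical_split_alt (terrain : List String) (diff : Int) : Int :=
  let cols := PySem.Str.len (PySem.List.pyGetD terrain 0 "")
  if cols < 2 then -1
  else
    let shift := PySem.Int.bitLength cols + 1
    let mask := (1 <<< shift) - 1
    let doubled := terrain.foldl (rowStep shift mask cols) (List.replicate (cols - 1).toNat 0)
    findLoopBsplit (terrain.length : Int) cols doubled diff (PySem.List.pyRange 0 (cols - 1) 1)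

-- ===== PRECONDITION & SPEC =====
-- Pre_ excludes the empty grid (A raises IndexError on terrain[0]) and ragged grids with a row
-- shorter than the first: the function's natural domain is a rectangular pattern, and A raises
-- IndexError on such grids unless it returns at an early split; rows longer than the first are admitted.
def Pre_find_vertical_split (terrain : List String) (diff : Int) : Prop :=
  terrain ≠ [] ∧ ((terrain.headD "").toList.length ≤ 1 ∨
    ∀ s ∈ terrain, (terrain.headD "").toList.length ≤ s.toList.length)
instance (terrain : List String) (diff : Int) : Decidable (Pre_find_vertical_split terrain diff) := by
  unfold Pre_find_vertical_split; infer_instance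

def pvWitness_find_vertical_split : List String × Int := (["#..#", ".##."], 0)

def Spec_find_vertical_split (terrain : List String) (diff : Int) (out : Int) : Prop := out = find_vertical_split_alt terrain diff
instance (terrain : List String) (diff : Int) (out : Int) : Decidable (Spec_find_vertical_split terrain diff out) := by unfold Spec_find_vertical_split; infer_instance

-- ===== CLAIM (what is proved, stated in full; the proofs are below) =====
def Claim_equal_find_vertical_split : Prop := ∀ (terrain : List String) (diff : Int), Dom_find_vertical_split terrain diff → Pre_find_vertical_split terrain diff → Spec_find_vertical_split terrain diff (find_vertical_split terrain diff)

-- ===== LEMMAS AND PROOFS =====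

-- ===== proof-only machinery =====
def valB (B : Nat) : List Nat → Nat
  | [] => 0
  | c :: l => c + B * valB B l

def addL : List Nat → List Nat → List Nat
  | [], b => b
  | a, [] => a
  | a :: as, b :: bs => (a + b) :: addL as bs

def convL : List Nat → List Nat → List Nat
  | [], _ => []
  | x :: xs, ys => addL (ys.map (x * ·)) (0 :: convL xs ys)

def indL (p : List Char) (ch : Char) : List Nat := p.map (fun c => if c = ch then 1 else 0)

theorem valB_addL (B : Nat) (a b : List Nat) : valB B (addL a b) = valB B a + valB B b := by
  induction a generalizing b with
  | nil => simp [addL, valB]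
  | cons x xs ih =>
    cases b with
    | nil => simp [addL, valB]
    | cons y ys => simp [addL, valB, ih]; ring

theorem valB_map_mul (B x : Nat) (l : List Nat) : valB B (l.map (x * ·)) = x * valB B l := by
  induction l with
  | nil => simp [valB]
  | cons c t ih => simp [valB, ih]; ring

theorem valB_conv (B : Nat) (xs ys : List Nat) :
    valB B (convL xs ys) = valB B xs * valB B ys := by
  induction xs with
  | nil => simp [convL, valB]
  | cons x t ih => simp [convL, valB, valB_addL, valB_map_mul, ih]; ring

theorem getD_addL (a b : List Nat) (k : Nat) :
    (addL a b).getD k 0 = a.getD k 0 + b.getD k 0 := by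
  induction a generalizing b k with
  | nil => simp [addL]
  | cons x xs ih =>
    cases b with
    | nil => simp [addL]
    | cons y ys => cases k with
      | zero => simp [addL]
      | succ m =>
        show (addL (x :: xs) (y :: ys)).getD (m+1) 0 = _
        simp only [addL, List.getD_cons_succ]
        exact ih ys m

theorem getD_map_mul (x : Nat) (l : List Nat) (k : Nat) :
    (l.map (x * ·)).getD k 0 = x * l.getD k 0 := by
  induction l generalizing k with
  | nil => simp
  | cons c t ih => cases k with
    | zero => simp
    | succ m => simp only [List.map_cons, List.getD_cons_succ]; exact ih m

theorem getD_conv (xs ys : List Nat) (k : Nat) :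
    (convL xs ys).getD k 0 = ∑ i ∈ Finset.range (k + 1), xs.getD i 0 * ys.getD (k - i) 0 := by
  induction xs generalizing k with
  | nil => simp [convL]
  | cons x t ih =>
    have hc : convL (x :: t) ys = addL (ys.map (x * ·)) (0 :: convL t ys) := rfl
    cases k with
    | zero =>
      rw [hc, getD_addL, getD_map_mul, List.getD_cons_zero]
      simp
    | succ m =>
      rw [hc, getD_addL, getD_map_mul, List.getD_cons_succ, ih]
      rw [Finset.sum_range_succ' (fun i => (x :: t).getD i 0 * ys.getD (m + 1 - i) 0) (m + 1)]
      simp only [List.getD_cons_succ, List.getD_cons_zero, Nat.succ_sub_succ, Nat.sub_zero]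
      ring

theorem valB_digit (B : Nat) (hB : 2 ≤ B) (l : List Nat) (h : ∀ c ∈ l, c < B) (t : Nat) :
    valB B l / B ^ t % B = l.getD t 0 := by
  induction l generalizing t with
  | nil => simp [valB]
  | cons c tl ih =>
    cases t with
    | zero =>
      simp only [valB, pow_zero, Nat.div_one, List.getD_cons_zero]
      rw [mul_comm, Nat.add_mul_mod_self_right]
      exact Nat.mod_eq_of_lt (h c (by simp))
    | succ m =>
      have h1 : (c + B * valB B tl) / B = valB B tl := by
        rw [Nat.add_mul_div_left _ _ (by omega), Nat.div_eq_of_lt (h c (by simp))]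
        omega
      simp only [valB, List.getD_cons_succ]
      rw [pow_succ', ← Nat.div_div_eq_div_mul, h1]
      exact ih (fun x hx => h x (by simp [hx])) m

theorem length_addL (a b : List Nat) : (addL a b).length = max a.length b.length := by
  induction a generalizing b with
  | nil => simp [addL]
  | cons x xs ih =>
    cases b with
    | nil => simp [addL]
    | cons y ys => simp [addL, ih]

theorem length_convL (xs ys : List Nat) : (convL xs ys).length ≤ xs.length + ys.length := by
  induction xs with
  | nil => simp [convL]
  | cons x t ih => simp [convL, length_addL]; omega

theorem indL_getD_le_one (p : List Char) (ch : Char) (i : Nat) : (indL p ch).getD i 0 ≤ 1 := by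
  induction p generalizing i with
  | nil => simp [indL]
  | cons c t ih =>
    cases i with
    | zero => simp [indL]; split <;> simp
    | succ m => simpa [indL] using ih m

theorem conv_ind_mem_lt (p : List Char) (ch : Char) (B : Nat)
    (hlen : 2 * p.length < B) (c : Nat) (hc : c ∈ convL (indL p ch) (indL p ch)) : c < B := by
  obtain ⟨t, ht, rfl⟩ := List.mem_iff_getElem.mp hc
  rw [← List.getD_eq_getElem _ 0 ht, getD_conv]
  have hlc := length_convL (indL p ch) (indL p ch)
  have hlen' : (indL p ch).length = p.length := by simp [indL]
  calc (∑ i ∈ Finset.range (t + 1), (indL p ch).getD i 0 * (indL p ch).getD (t - i) 0)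
      ≤ ∑ _i ∈ Finset.range (t + 1), 1 := by
        apply Finset.sum_le_sum
        intro i _
        exact Nat.mul_le_mul (indL_getD_le_one p ch i) (indL_getD_le_one p ch (t - i))
    _ = t + 1 := by simp
    _ < B := by omega
def mEq (p : List Char) (k j : Nat) : Nat :=
  if p.getD (k - j) ' ' = p.getD (k + j + 1) ' ' then 1 else 0

def mrow (p : List Char) (C k : Nat) : Nat :=
  ∑ j ∈ Finset.range (min (k + 1) (C - 1 - k)), mEq p k j

def eqInd (p : List Char) (k i : Nat) : Nat :=
  if i < p.length ∧ 2 * k + 1 - i < p.length ∧ p.getD i ' ' = p.getD (2 * k + 1 - i) ' '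
  then 1 else 0

theorem pack_fold (ch : Char) (shift : Nat) (p : List Char) (s : Nat) (acc : Nat) :
    (PySem.List.enumerate p (s : Int)).foldl
      (fun n ic => if ic.2 = ch then n + (1 <<< (ic.1.toNat * shift)) else n) acc
    = acc + 2 ^ (s * shift) * valB (2 ^ shift) (indL p ch) := by
  induction p generalizing s acc with
  | nil => simp [PySem.List.enumerate_nil, indL, valB]
  | cons c t ih =>
    rw [PySem.List.enumerate_cons, List.foldl_cons]
    have hcast : ((s : Int) + 1) = ((s + 1 : Nat) : Int) := by push_cast; ring
    rw [hcast, ih]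
    have hpow : 2 ^ ((s + 1) * shift) = 2 ^ (s * shift) * 2 ^ shift := by
      rw [Nat.succ_mul, pow_add]
    simp only [indL, List.map_cons, valB, Nat.one_shiftLeft, Int.toNat_natCast]
    split
    · rw [hpow]; ring
    · rw [hpow]; ring

theorem packB_eq (p : List Char) (ch : Char) (shift : Nat) :
    packB p ch shift = valB (2 ^ shift) (indL p ch) := by
  unfold packB
  have h := pack_fold ch shift p 0 0
  simpa using h

theorem digit_of_sq (p : List Char) (ch : Char) (shift : Nat)
    (hs : 1 ≤ shift) (hlen : 2 * p.length < 2 ^ shift) (t : Nat) :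
    ((packB p ch shift * packB p ch shift) >>> (t * shift)) &&& ((1 <<< shift) - 1)
    = (convL (indL p ch) (indL p ch)).getD t 0 := by
  rw [packB_eq, ← valB_conv]
  rw [Nat.shiftRight_eq_div_pow, Nat.one_shiftLeft, Nat.and_two_pow_sub_one_eq_mod]
  rw [mul_comm t shift, pow_mul]
  exact valB_digit (2 ^ shift) (by
      calc 2 = 2 ^ 1 := (pow_one 2).symm
      _ ≤ 2 ^ shift := Nat.pow_le_pow_right (by omega) hs)
    _ (conv_ind_mem_lt p ch (2 ^ shift) hlen) t

theorem indL_getD (p : List Char) (ch : Char) (i : Nat) :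
    (indL p ch).getD i 0 = if h : i < p.length then (if p[i] = ch then 1 else 0) else 0 := by
  split
  · rename_i h
    rw [List.getD_eq_getElem _ _ (by simpa [indL] using h)]
    simp [indL]
  · rename_i h
    exact List.getD_eq_default _ _ (by simpa [indL] using Nat.le_of_not_lt h)

theorem sum_ind_nodup (l : List Char) (a b : Char) (hnd : l.Nodup) (ha : a ∈ l) :
    (l.map (fun ch => (if a = ch then (1 : Nat) else 0) * (if b = ch then 1 else 0))).sum
      = if a = b then 1 else 0 := by
  induction l with
  | nil => cases ha
  | cons x t ih =>
    simp only [List.map_cons, List.sum_cons]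
    rcases List.mem_cons.mp ha with rfl | hat
    · have hx : a ∉ t := (List.nodup_cons.mp hnd).1
      have ht0 : (t.map (fun ch => (if a = ch then (1 : Nat) else 0) * (if b = ch then 1 else 0))).sum = 0 := by
        apply List.sum_eq_zero
        intro y hy
        obtain ⟨ch, hch, rfl⟩ := List.mem_map.mp hy
        have hne : a ≠ ch := fun e => hx (e ▸ hch)
        simp [hne]
      rw [ht0]
      by_cases hb : b = a
      · simp [hb]
      · have hab : a ≠ b := fun e => hb e.symm
        simp [hb, hab]
    · have hax : a ≠ x := by
        rintro rfl
        exact (List.nodup_cons.mp hnd).1 hat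
      rw [if_neg hax]
      simp only [zero_mul, zero_add]
      exact ih (List.nodup_cons.mp hnd).2 hat

theorem map_sum_comm {α : Type} (l : List α) (n : Nat) (g : α → Nat → Nat) :
    (l.map (fun x => ∑ i ∈ Finset.range n, g x i)).sum
      = ∑ i ∈ Finset.range n, (l.map (fun x => g x i)).sum := by
  induction l with
  | nil => simp
  | cons x t ih => simp [ih, Finset.sum_add_distrib]

theorem sum_digits_eq (p : List Char) (k : Nat) :
    ((PySem.Set.ofList p).map
        (fun ch => (convL (indL p ch) (indL p ch)).getD (2 * k + 1) 0)).sum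
      = ∑ i ∈ Finset.range (2 * k + 2), eqInd p k i := by
  have h1 : ((PySem.Set.ofList p).map
        (fun ch => (convL (indL p ch) (indL p ch)).getD (2 * k + 1) 0)).sum
      = ((PySem.Set.ofList p).map
        (fun ch => ∑ i ∈ Finset.range (2 * k + 2),
          (indL p ch).getD i 0 * (indL p ch).getD (2 * k + 1 - i) 0)).sum := by
    congr 1
    apply List.map_congr_left
    intro ch _
    exact getD_conv _ _ _
  rw [h1, map_sum_comm]
  apply Finset.sum_congr rfl
  intro i _
  by_cases hi : i < p.length ∧ 2 * k + 1 - i < p.length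
  · obtain ⟨hi1, hi2⟩ := hi
    have hterm : ∀ ch, (indL p ch).getD i 0 * (indL p ch).getD (2 * k + 1 - i) 0
        = (if p[i] = ch then (1 : Nat) else 0) * (if p[2 * k + 1 - i]'hi2 = ch then 1 else 0) := by
      intro ch
      rw [indL_getD, indL_getD, dif_pos hi1, dif_pos hi2]
    have hmap : ((PySem.Set.ofList p).map
          (fun ch => (indL p ch).getD i 0 * (indL p ch).getD (2 * k + 1 - i) 0)).sum
        = ((PySem.Set.ofList p).map
          (fun ch => (if p[i] = ch then (1 : Nat) else 0) * (if p[2 * k + 1 - i]'hi2 = ch then 1 else 0))).sum := by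
      congr 1
      exact List.map_congr_left (fun ch _ => hterm ch)
    rw [hmap, sum_ind_nodup _ _ _ (PySem.Set.nodup_ofList p)
      ((PySem.Set.mem_ofList p _).mpr (List.getElem_mem hi1))]
    unfold eqInd
    rw [List.getD_eq_getElem _ _ hi1, List.getD_eq_getElem _ _ hi2]
    simp [hi1, hi2]
  · have hz : ∀ ch, (indL p ch).getD i 0 * (indL p ch).getD (2 * k + 1 - i) 0 = 0 := by
      intro ch
      rw [indL_getD, indL_getD]
      rcases Decidable.not_and_iff_not_or_not.mp hi with h | h
      · rw [dif_neg h, zero_mul]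
      · rw [dif_neg h, mul_zero]
    have : ((PySem.Set.ofList p).map
        (fun ch => (indL p ch).getD i 0 * (indL p ch).getD (2 * k + 1 - i) 0)).sum = 0 := by
      apply List.sum_eq_zero
      intro y hy
      obtain ⟨ch, _, rfl⟩ := List.mem_map.mp hy
      exact hz ch
    rw [this]
    unfold eqInd
    rw [if_neg (by tauto)]

theorem sum_eqInd (p : List Char) (C k : Nat) (hp : p.length = C) (hk : k + 1 < C) :
    ∑ i ∈ Finset.range (2 * k + 2), eqInd p k i = 2 * mrow p C k := by
  have h2 : 2 * k + 2 = (k + 1) + (k + 1) := by ring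
  rw [h2, Finset.sum_range_add]
  have hfilter : (Finset.range (k + 1)).filter (fun j => j < C - 1 - k)
      = Finset.range (min (k + 1) (C - 1 - k)) := by
    ext j
    simp only [Finset.mem_filter, Finset.mem_range, lt_min_iff]
  have hfirst : ∑ i ∈ Finset.range (k + 1), eqInd p k i = mrow p C k := by
    rw [← Finset.sum_range_reflect (fun i => eqInd p k i) (k + 1)]
    have hcong : ∀ j ∈ Finset.range (k + 1),
        eqInd p k (k + 1 - 1 - j) = if j < C - 1 - k then mEq p k j else 0 := by
      intro j hj
      have hjk : j ≤ k := Nat.lt_succ_iff.mp (Finset.mem_range.mp hj)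
      have he : k + 1 - 1 - j = k - j := by omega
      have hsub : 2 * k + 1 - (k - j) = k + j + 1 := by omega
      unfold eqInd
      rw [he, hsub, hp]
      by_cases hc : j < C - 1 - k
      · have hkj : k + j + 1 < C := by omega
        by_cases he2 : p.getD (k - j) ' ' = p.getD (k + j + 1) ' '
        · rw [if_pos ⟨by omega, hkj, he2⟩, if_pos hc, mEq, if_pos he2]
        · rw [if_neg (fun h => he2 h.2.2), if_pos hc, mEq, if_neg he2]
      · have hnc : ¬ (k + j + 1 < C) := by omega
        rw [if_neg (fun h => hnc h.2.1), if_neg hc]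
    rw [Finset.sum_congr rfl hcong, ← Finset.sum_filter, hfilter]
    rfl
  have hsecond : ∑ i ∈ Finset.range (k + 1), eqInd p k (k + 1 + i) = mrow p C k := by
    have hcong : ∀ j ∈ Finset.range (k + 1),
        eqInd p k (k + 1 + j) = if j < C - 1 - k then mEq p k j else 0 := by
      intro j hj
      have hjk : j ≤ k := Nat.lt_succ_iff.mp (Finset.mem_range.mp hj)
      have hsub : 2 * k + 1 - (k + 1 + j) = k - j := by omega
      unfold eqInd
      rw [hsub, hp]
      by_cases hc : j < C - 1 - k
      · have hkj : k + 1 + j < C := by omega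
        by_cases he2 : p.getD (k - j) ' ' = p.getD (k + j + 1) ' '
        · have he3 : p.getD (k + 1 + j) ' ' = p.getD (k - j) ' ' := by
            rw [show k + 1 + j = k + j + 1 by omega]
            exact he2.symm
          rw [if_pos ⟨hkj, by omega, he3⟩, if_pos hc, mEq, if_pos he2]
        · have he3 : ¬ p.getD (k + 1 + j) ' ' = p.getD (k - j) ' ' := by
            rw [show k + 1 + j = k + j + 1 by omega]
            exact fun h => he2 h.symm
          rw [if_neg (fun h => he3 h.2.2), if_pos hc, mEq, if_neg he2]
      · have hnc : ¬ (k + 1 + j < C) := by omega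
        rw [if_neg (fun h => hnc h.1), if_neg hc]
    rw [Finset.sum_congr rfl hcong, ← Finset.sum_filter, hfilter]
    rfl
  rw [hfirst, hsecond]
  ring
-- ===== B-side: doubled-array characterization =====
def rowC (shift mask : Nat) (cols : Int) (row : String) (k : Nat) : Nat :=
  ((PySem.Set.ofList (PySem.List.slice row.toList none (some cols))).map
    (fun ch => ((packB (PySem.List.slice row.toList none (some cols)) ch shift
                 * packB (PySem.List.slice row.toList none (some cols)) ch shift)
                >>> ((2 * k + 1) * shift)) &&& mask)).sum

theorem length_addDigits (d : List Nat) (sq shift mask : Nat) :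
    (addDigits d sq shift mask).length = d.length := by
  simp [addDigits, PySem.List.length_enumerate]

theorem getD_addDigits (d : List Nat) (sq shift mask k : Nat) (hk : k < d.length) :
    (addDigits d sq shift mask).getD k 0
      = d.getD k 0 + ((sq >>> ((2 * k + 1) * shift)) &&& mask) := by
  have hk' : k < (addDigits d sq shift mask).length := by rw [length_addDigits]; exact hk
  rw [List.getD_eq_getElem _ _ hk', List.getD_eq_getElem _ _ hk]
  unfold addDigits
  rw [List.getElem_map, PySem.List.getElem_enumerate]
  simp

theorem length_foldl_addDigits (shift mask : Nat) (f : Char → Nat) (chs : List Char) (d : List Nat) :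
    (chs.foldl (fun d ch => addDigits d (f ch) shift mask) d).length = d.length := by
  induction chs generalizing d with
  | nil => rfl
  | cons ch t ih => rw [List.foldl_cons, ih, length_addDigits]

theorem getD_foldl_addDigits (shift mask : Nat) (f : Char → Nat) (chs : List Char)
    (d : List Nat) (k : Nat) (hk : k < d.length) :
    (chs.foldl (fun d ch => addDigits d (f ch) shift mask) d).getD k 0
      = d.getD k 0 + (chs.map (fun ch => ((f ch) >>> ((2 * k + 1) * shift)) &&& mask)).sum := by
  induction chs generalizing d with
  | nil => simp
  | cons ch t ih =>
    rw [List.foldl_cons, ih _ (by rw [length_addDigits]; exact hk),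
      getD_addDigits _ _ _ _ _ hk, List.map_cons, List.sum_cons]
    omega

theorem length_rowStep (shift mask : Nat) (cols : Int) (d : List Nat) (row : String) :
    (rowStep shift mask cols d row).length = d.length := by
  unfold rowStep
  exact length_foldl_addDigits _ _ _ _ _

theorem getD_rowStep (shift mask : Nat) (cols : Int) (d : List Nat) (row : String)
    (k : Nat) (hk : k < d.length) :
    (rowStep shift mask cols d row).getD k 0 = d.getD k 0 + rowC shift mask cols row k := by
  unfold rowStep rowC
  exact getD_foldl_addDigits _ _ _ _ _ _ hk

theorem getD_foldl_rowStep (shift mask : Nat) (cols : Int) (terrain : List String)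
    (d : List Nat) (k : Nat) (hk : k < d.length) :
    (terrain.foldl (rowStep shift mask cols) d).getD k 0
      = d.getD k 0 + (terrain.map (fun row => rowC shift mask cols row k)).sum := by
  induction terrain generalizing d with
  | nil => simp
  | cons r t ih =>
    rw [List.foldl_cons, ih _ (by rw [length_rowStep]; exact hk),
      getD_rowStep _ _ _ _ _ _ hk, List.map_cons, List.sum_cons]
    omega

theorem rowC_eq (C k : Nat) (row : String) (hrow : C ≤ row.toList.length) (hk : k + 1 < C) :
    rowC (PySem.Int.bitLength (C : Int) + 1) ((1 <<< (PySem.Int.bitLength (C : Int) + 1)) - 1)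
        (C : Int) row k
      = 2 * mrow (row.toList.take C) C k := by
  set shift := PySem.Int.bitLength (C : Int) + 1 with hshift
  have hpfx : PySem.List.slice row.toList none (some (C : Int)) = row.toList.take C :=
    PySem.List.slice_to_natCast row.toList C
  have hplen : (row.toList.take C).length = C := by rw [List.length_take]; omega
  have hlt : 2 * (row.toList.take C).length < 2 ^ shift := by
    have h1 : C < 2 ^ PySem.Int.bitLength (C : Int) := by
      have := PySem.Int.lt_two_pow_bitLength (C : Int)
      simpa using this
    rw [hplen, hshift, pow_succ]
    omega
  unfold rowC
  rw [hpfx]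
  have hmap : (PySem.Set.ofList (row.toList.take C)).map
        (fun ch => ((packB (row.toList.take C) ch shift * packB (row.toList.take C) ch shift)
                    >>> ((2 * k + 1) * shift)) &&& ((1 <<< shift) - 1))
      = (PySem.Set.ofList (row.toList.take C)).map
        (fun ch => (convL (indL (row.toList.take C) ch) (indL (row.toList.take C) ch)).getD (2 * k + 1) 0) := by
    apply List.map_congr_left
    intro ch _
    exact digit_of_sq _ ch shift (by omega) hlt (2 * k + 1)
  rw [hmap, sum_digits_eq, sum_eqInd _ C k hplen hk]

-- ===== A-side: actual_diff characterization =====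
theorem take_getD (l : List Char) (C i : Nat) (hi : i < C) (hC : C ≤ l.length) :
    (l.take C).getD i ' ' = l.getD i ' ' := by
  rw [List.getD_eq_getElem _ _ (by simp; omega), List.getD_eq_getElem _ _ (by omega)]
  exact List.getElem_take

theorem char_test_eq (s : String) (k1 k2 : Nat)
    (h1 : k1 < s.toList.length) (h2 : k2 < s.toList.length) :
    (decide (PySem.Str.pyGet? s (k1 : Int) ≠ PySem.Str.pyGet? s (k2 : Int)))
      = (s.toList.getD k1 ' ' != s.toList.getD k2 ' ') := by
  simp only [PySem.Str.pyGet?_natCast]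
  rw [List.getElem?_eq_getElem h1, List.getElem?_eq_getElem h2,
    List.getD_eq_getElem _ _ h1, List.getD_eq_getElem _ _ h2]
  rw [Bool.eq_iff_iff]
  simp [bne]

theorem col_diff_eq (terrain : List String) (c1 c2 : Int) :
    col_diff terrain c1 c2 =
      (terrain.countP (fun s => decide (PySem.Str.pyGet? s c1 ≠ PySem.Str.pyGet? s c2)) : Int) := by
  unfold col_diff
  rw [PySem.List.foldl_pyRange_zero_pyGetD' terrain ""
      (fun d s => if PySem.Str.pyGet? s c1 ≠ PySem.Str.pyGet? s c2 then d + 1 else d) 0]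
  rw [PySem.List.foldl_ite_add_one]
  simp

theorem countP_add_sum {α : Type} (l : List α) (p : α → Bool) (g : α → Nat)
    (h : ∀ r ∈ l, (if p r then 1 else 0) + g r = 1) :
    l.countP p + (l.map g).sum = l.length := by
  induction l with
  | nil => simp
  | cons a t ih =>
    rw [List.countP_cons, List.map_cons, List.sum_cons, List.length_cons]
    have ha := h a (List.mem_cons_self)
    have ht := ih (fun r hr => h r (List.mem_cons_of_mem _ hr))
    by_cases hpa : p a = true <;> simp [hpa] at ha ⊢ <;> omega

theorem countP_eq_len_sub (terrain : List String) (C k j : Nat)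
    (hall : ∀ s ∈ terrain, C ≤ s.toList.length) (hkj : k - j < C) (hkj2 : k + j + 1 < C) :
    (terrain.countP (fun s => decide (PySem.Str.pyGet? s ((k - j : Nat) : Int)
        ≠ PySem.Str.pyGet? s ((k + j + 1 : Nat) : Int))) : Int)
      = (terrain.length : Int) - ((terrain.map (fun r => mEq (r.toList.take C) k j)).sum : Int) := by
  have h := countP_add_sum terrain
    (fun s => decide (PySem.Str.pyGet? s ((k - j : Nat) : Int)
        ≠ PySem.Str.pyGet? s ((k + j + 1 : Nat) : Int)))
    (fun r => mEq (r.toList.take C) k j) ?_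
  · omega
  · intro r hr
    have hC := hall r hr
    show (if decide (PySem.Str.pyGet? r ((k - j : Nat) : Int)
        ≠ PySem.Str.pyGet? r ((k + j + 1 : Nat) : Int)) = true then 1 else 0)
      + mEq (r.toList.take C) k j = 1
    rw [char_test_eq r (k - j) (k + j + 1) (by omega) (by omega)]
    unfold mEq
    rw [take_getD _ _ _ hkj hC, take_getD _ _ _ hkj2 hC]
    split <;> rename_i hsp <;> simp only [bne_iff_ne, ne_eq] at hsp <;>
      simp only [List.getD] at hsp <;> simp [hsp]
theorem list_range_map_sum_int (n : Nat) (f : Nat → Int) :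
    ((List.range n).map f).sum = ∑ i ∈ Finset.range n, f i := rfl

theorem bodyA_eq (terrain : List String) (C k : Nat)
    (hall : ∀ s ∈ terrain, C ≤ s.toList.length) (hk : k + 1 < C) :
    (PySem.List.pyRange 0 (min ((k : Int) + 1) ((C : Int) - (k : Int) - 1)) 1).foldl
        (fun acc j => acc + col_diff terrain ((k : Int) - j) ((k : Int) + j + 1)) 0
      = (terrain.length : Int) * min ((k : Int) + 1) ((C : Int) - (k : Int) - 1)
        - ((terrain.map (fun row => mrow (row.toList.take C) C k)).sum : Int) := by
  set dn : Nat := min (k + 1) (C - 1 - k) with hdn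
  have hdmin : min ((k : Int) + 1) ((C : Int) - (k : Int) - 1) = (dn : Int) := by
    simp only [hdn]; push_cast; omega
  rw [hdmin]
  rw [PySem.List.foldl_add (g := fun j => col_diff terrain ((k : Int) - j) ((k : Int) + j + 1))]
  rw [PySem.List.pyRange_one]
  simp only [Int.sub_zero, Int.toNat_natCast, List.map_map, zero_add]
  have hmap : (List.range dn).map
        ((fun j => col_diff terrain ((k : Int) - j) ((k : Int) + j + 1)) ∘ (fun j : Nat => (j : Int)))
      = (List.range dn).map (fun j =>
          (terrain.length : Int) - ((terrain.map (fun r => mEq (r.toList.take C) k j)).sum : Int)) := by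
    apply List.map_congr_left
    intro j hj
    have hj' : j < dn := List.mem_range.mp hj
    simp only [Function.comp_apply]
    have e1 : (k : Int) - (j : Int) = ((k - j : Nat) : Int) := by omega
    have e2 : (k : Int) + (j : Int) + 1 = ((k + j + 1 : Nat) : Int) := by omega
    rw [e1, e2, col_diff_eq]
    exact countP_eq_len_sub terrain C k j hall (by omega) (by omega)
  rw [hmap, list_range_map_sum_int, Finset.sum_sub_distrib, Finset.sum_const, Finset.card_range]
  have hM : ∑ j ∈ Finset.range dn, ((terrain.map (fun r => mEq (r.toList.take C) k j)).sum : Int)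
      = ((terrain.map (fun row => mrow (row.toList.take C) C k)).sum : Int) := by
    have hswap := map_sum_comm terrain dn (fun r j => mEq (r.toList.take C) k j)
    have hmrow : (terrain.map (fun row => mrow (row.toList.take C) C k))
        = (terrain.map (fun r => ∑ j ∈ Finset.range dn, mEq (r.toList.take C) k j)) := by
      apply List.map_congr_left
      intro r _
      rw [mrow, ← hdn]
    rw [hmrow, hswap]
    push_cast [Nat.cast_sum]
    rfl
  rw [hM]
  push_cast
  ring

theorem doubled_getD (terrain : List String) (C k : Nat)
    (hall : ∀ s ∈ terrain, C ≤ s.toList.length) (hk : k + 1 < C) :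
    (terrain.foldl
        (rowStep (PySem.Int.bitLength (C : Int) + 1)
          ((1 <<< (PySem.Int.bitLength (C : Int) + 1)) - 1) (C : Int))
        (List.replicate (((C : Int) - 1).toNat) 0)).getD k 0
      = 2 * (terrain.map (fun row => mrow (row.toList.take C) C k)).sum := by
  have hlen : (List.replicate (((C : Int) - 1).toNat) (0 : Nat)).length = C - 1 := by
    simp
  rw [getD_foldl_rowStep _ _ _ _ _ _ (by rw [hlen]; omega)]
  have hz : (List.replicate (((C : Int) - 1).toNat) (0 : Nat)).getD k 0 = 0 := by
    simp [List.getD]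
  rw [hz, zero_add]
  have hcong : terrain.map (fun row =>
        rowC (PySem.Int.bitLength (C : Int) + 1)
          ((1 <<< (PySem.Int.bitLength (C : Int) + 1)) - 1) (C : Int) row k)
      = terrain.map (fun row => 2 * mrow (row.toList.take C) C k) := by
    apply List.map_congr_left
    intro r hr
    exact rowC_eq C k r (hall r hr) hk
  rw [hcong, List.sum_map_mul_left]

theorem loops_eq (terrain : List String) (diff cols rows : Int) (doubled : List Nat)
    (L : List Int)
    (hbody : ∀ s ∈ L,
      (PySem.List.pyRange 0 (min (s + 1) (cols - s - 1)) 1).foldl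
          (fun acc j => acc + col_diff terrain (s - j) (s + j + 1)) 0
        = rows * min (s + 1) (cols - s - 1) - ((PySem.List.pyGetD doubled s 0 / 2 : Nat) : Int)) :
    findLoopA terrain diff cols L = findLoopBsplit rows cols doubled diff L := by
  induction L with
  | nil => rfl
  | cons s rest ih =>
    simp only [findLoopA, findLoopBsplit]
    rw [hbody s List.mem_cons_self]
    split
    · rfl
    · exact ih (fun t ht => hbody t (List.mem_cons_of_mem _ ht))
-- ===== VERDICT (by name: the statement is the Claim_ definition above) =====
theorem find_vertical_split_spec : Claim_equal_find_vertical_split := by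
  intro terrain diff _ hpre
  obtain ⟨hne, hcase⟩ := hpre
  unfold Spec_find_vertical_split
  have hget0 : PySem.List.pyGetD terrain 0 "" = terrain.headD "" := by
    cases terrain with
    | nil => exact absurd rfl hne
    | cons a l => simp [PySem.List.pyGetD_zero_cons]
  have hlen0 : PySem.Str.len (PySem.List.pyGetD terrain 0 "")
      = ((terrain.headD "").toList.length : Int) := by
    rw [hget0]; simp [pysem]
  set C : Nat := (terrain.headD "").toList.length with hC
  show findLoopA terrain diff (PySem.Str.len (PySem.List.pyGetD terrain 0 ""))
        (PySem.List.pyRange 0 (PySem.Str.len (PySem.List.pyGetD terrain 0 "") - 1) 1)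
      = find_vertical_split_alt terrain diff
  unfold find_vertical_split_alt
  rw [hlen0]
  by_cases hsmall : ((C : Int)) < 2
  · rw [if_pos hsmall, PySem.List.pyRange_one_eq_nil (by omega)]
    rfl
  · rw [if_neg hsmall]
    have hC2 : 2 ≤ C := by omega
    have hall : ∀ s ∈ terrain, C ≤ s.toList.length := by
      rcases hcase with h1 | h2
      · omega
      · exact h2
    apply loops_eq
    intro s hs
    rw [PySem.List.mem_pyRange_one] at hs
    obtain ⟨hs0, hs1⟩ := hs
    obtain ⟨k, rfl⟩ : ∃ k : Nat, s = (k : Int) := ⟨s.toNat, by omega⟩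
    have hk : k + 1 < C := by omega
    rw [PySem.List.pyGetD_natCast]
    rw [doubled_getD terrain C k hall hk]
    rw [Nat.mul_div_cancel_left _ (by omega : 0 < 2)]
    exact bodyA_eq terrain C k hall hk
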